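-- pv_equiv track=rewrite | github.com/jackcommon/python | latpot/2013_03_Turtle-crossing.py | turtle_crossing
-- ===== SOURCE A (Python) =====
-- def turtle_crossing(A):
--     aset = {(0,0)}
--     x, y = 0, 0
--     stepscount = 1
--     for walk, value in enumerate(A):
--         if walk % 4 == 0:
--             temp = {(x,y+(i+1)) for i in range(value)}
--             y += value
--         elif walk % 4 == 1:
--             temp = {(x+(i+1),y) for i in range(value)}
--             x += value
--         elif walk % 4 == 2:
--             temp = {(x,y-(i+1)) for i in range(value)}
--             y -= value
--         elif walk % 4 == 3:
--             temp = {(x-(i+1),y) for i in range(value)}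
--             x -= value
--         aset = aset.union(temp)
--         stepscount += value
--         if (stepscount != len(aset)):
--             return(walk+1)
--     return 0
-- ===== SOURCE B (Python) =====
-- def turtle_crossing(A):
--     # Treat each move as an axis-aligned segment of grid cells; a crossing happens
--     # exactly when the move's cell count differs from the number of genuinely new
--     # cells, i.e. when the move is negative or its segment hits the origin or a
--     # previous segment.  O(n^2) in the number of moves, independent of step sizes.
--     segs = []  # normalized boxes (x1, y1, x2, y2), x1 <= x2, y1 <= y2
--     x = y = 0
--     for walk, value in enumerate(A):
--         d = walk % 4
--         if d == 0:
--             seg = (x, y + 1, x, y + value)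
--             nx, ny = x, y + value
--         elif d == 1:
--             seg = (x + 1, y, x + value, y)
--             nx, ny = x + value, y
--         elif d == 2:
--             seg = (x, y - value, x, y - 1)
--             nx, ny = x, y - value
--         else:
--             seg = (x - value, y, x - 1, y)
--             nx, ny = x - value, y
--         if value < 0 or (value > 0 and _hits(seg, segs)):
--             return walk + 1
--         if value > 0:
--             segs.append(seg)
--         x, y = nx, ny
--     return 0
--
--
-- def _hits(seg, segs):
--     x1, y1, x2, y2 = seg
--     if x1 <= 0 <= x2 and y1 <= 0 <= y2:  # origin
--         return True
--     for (a1, b1, a2, b2) in segs: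
--         if x1 <= a2 and a1 <= x2 and y1 <= b2 and b1 <= y2:
--             return True
--     return False
-- ===== Notes on version B (the rewrite author's own statement) =====
-- stated objective: faster
-- what changed: B replaces A's cell-by-cell visited set (one set element per unit step) with one axis-aligned segment per move and detects a crossing by box-intersection tests against the previous segments and the origin, so the work depends on the number of moves, not the sum of the step values.
import Mathlib
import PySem

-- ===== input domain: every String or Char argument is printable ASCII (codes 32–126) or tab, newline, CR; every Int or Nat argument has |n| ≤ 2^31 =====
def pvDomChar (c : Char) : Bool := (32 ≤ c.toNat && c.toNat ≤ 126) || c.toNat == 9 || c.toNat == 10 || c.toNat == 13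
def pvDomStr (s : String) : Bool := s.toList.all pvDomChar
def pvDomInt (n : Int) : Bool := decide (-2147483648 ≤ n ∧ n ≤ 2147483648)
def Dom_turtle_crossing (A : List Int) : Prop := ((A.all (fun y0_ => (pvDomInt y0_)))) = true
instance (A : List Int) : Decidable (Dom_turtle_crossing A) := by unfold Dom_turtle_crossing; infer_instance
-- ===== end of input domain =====

-- B replaces A's cell-by-cell visited set with per-move segments and box-intersection
-- tests, making the cost depend on the number of moves instead of the sum of step values.

-- ===== PORT A =====
-- per-iteration branch of A's loop: (temp, new x, new y)
def turtleTempA (walk : Nat) (x y value : Int) : PySem.Set (Int × Int) × Int × Int :=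
  if walk % 4 == 0 then
    (PySem.Set.ofList ((PySem.List.pyRange 0 value 1).map (fun i => (x, y + (i + 1)))), x, y + value)
  else if walk % 4 == 1 then
    (PySem.Set.ofList ((PySem.List.pyRange 0 value 1).map (fun i => (x + (i + 1), y))), x + value, y)
  else if walk % 4 == 2 then
    (PySem.Set.ofList ((PySem.List.pyRange 0 value 1).map (fun i => (x, y - (i + 1)))), x, y - value)
  else
    (PySem.Set.ofList ((PySem.List.pyRange 0 value 1).map (fun i => (x - (i + 1), y))), x - value, y)

def turtleGoA : List Int → Nat → PySem.Set (Int × Int) → Int → Int → Int → Int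
  | [], _, _, _, _, _ => 0
  | value :: rest, walk, aset, x, y, stepscount =>
    let t := turtleTempA walk x y value
    let aset' := PySem.Set.union aset t.1
    let stepscount' := stepscount + value
    if stepscount' ≠ (aset'.length : Int) then (walk : Int) + 1
    else turtleGoA rest (walk + 1) aset' t.2.1 t.2.2 stepscount'

def turtle_crossing (A : List Int) : Int :=
  turtleGoA A 0 (PySem.Set.ofList [((0 : Int), (0 : Int))]) 0 0 1

-- ===== PORT B =====
def segHitsOrigin : Int × Int × Int × Int → Bool
  | (x1, y1, x2, y2) => decide (x1 ≤ 0) && decide (0 ≤ x2) && decide (y1 ≤ 0) && decide (0 ≤ y2)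

def segHit : Int × Int × Int × Int → Int × Int × Int × Int → Bool
  | (x1, y1, x2, y2), (a1, b1, a2, b2) =>
    decide (x1 ≤ a2) && decide (a1 ≤ x2) && decide (y1 ≤ b2) && decide (b1 ≤ y2)

-- Source B's _hits
def segHits (seg : Int × Int × Int × Int) (segs : List (Int × Int × Int × Int)) : Bool :=
  segHitsOrigin seg || segs.any (fun s => segHit seg s)

-- per-iteration branch of B's loop: (segment, new x, new y)
def turtleMoveB (walk : Nat) (x y value : Int) : (Int × Int × Int × Int) × Int × Int :=
  if walk % 4 == 0 then ((x, y + 1, x, y + value), x, y + value)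
  else if walk % 4 == 1 then ((x + 1, y, x + value, y), x + value, y)
  else if walk % 4 == 2 then ((x, y - value, x, y - 1), x, y - value)
  else ((x - value, y, x - 1, y), x - value, y)

def turtleGoB : List Int → Nat → List (Int × Int × Int × Int) → Int → Int → Int
  | [], _, _, _, _ => 0
  | value :: rest, walk, segs, x, y =>
    let m := turtleMoveB walk x y value
    if value < 0 || (value > 0 && segHits m.1 segs) then (walk : Int) + 1
    else turtleGoB rest (walk + 1) (if value > 0 then segs ++ [m.1] else segs) m.2.1 m.2.2

def turtle_crossing_alt (A : List Int) : Int := turtleGoB A 0 [] 0 0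

-- ===== PRECONDITION & SPEC =====
def Spec_turtle_crossing (A : List Int) (out : Int) : Prop := out = turtle_crossing_alt A
instance (A : List Int) (out : Int) : Decidable (Spec_turtle_crossing A out) := by unfold Spec_turtle_crossing; infer_instance

-- ===== CLAIM (what is proved, stated in full; the proofs are below) =====
def Claim_equal_turtle_crossing : Prop := ∀ (A : List Int), Dom_turtle_crossing A → Spec_turtle_crossing A (turtle_crossing A)

-- ===== LEMMAS AND PROOFS =====

-- p is a grid cell of the (inclusive) box s = (x1, y1, x2, y2)
def inSegP (p : Int × Int) (s : Int × Int × Int × Int) : Prop :=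
  s.1 ≤ p.1 ∧ p.1 ≤ s.2.2.1 ∧ s.2.1 ≤ p.2 ∧ p.2 ≤ s.2.2.2

-- a nonempty (normalized) box
def goodP (s : Int × Int × Int × Int) : Prop := s.1 ≤ s.2.2.1 ∧ s.2.1 ≤ s.2.2.2

lemma segHitsOrigin_iff (s : Int × Int × Int × Int) :
    segHitsOrigin s = true ↔ inSegP (0, 0) s := by
  obtain ⟨x1, y1, x2, y2⟩ := s
  simp [segHitsOrigin, inSegP, and_assoc]

lemma segHit_iff (s t : Int × Int × Int × Int) (hs : goodP s) (ht : goodP t) :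
    segHit s t = true ↔ ∃ p, inSegP p s ∧ inSegP p t := by
  obtain ⟨x1, y1, x2, y2⟩ := s
  obtain ⟨a1, b1, a2, b2⟩ := t
  simp only [goodP] at hs ht
  simp only [segHit, Bool.and_eq_true, decide_eq_true_eq]
  constructor
  · intro h
    refine ⟨(max x1 a1, max y1 b1), ?_, ?_⟩ <;> (dsimp only [inSegP]; omega)
  · rintro ⟨⟨px, py⟩, hp, hq⟩
    dsimp only [inSegP] at hp hq hs ht
    omega

-- generic facts about one move's cell list
lemma cells_core (f : Int → Int × Int) (hinj : ∀ i j, f i = f j → i = j) (v : Int)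
    (seg : Int × Int × Int × Int)
    (hchar : ∀ p, inSegP p seg ↔ ∃ i, 0 ≤ i ∧ i < v ∧ p = f i) :
    ((PySem.List.pyRange 0 v 1).map f).Nodup ∧
    ((PySem.List.pyRange 0 v 1).map f).length = v.toNat ∧
    (∀ p, p ∈ (PySem.List.pyRange 0 v 1).map f ↔ inSegP p seg) := by
  refine ⟨?_, ?_, ?_⟩
  · exact (PySem.List.nodup_pyRange_one 0 v).map_on (fun i _ j _ h => hinj i j h)
  · simp [PySem.List.length_pyRange_one]
  · intro p
    rw [hchar]
    simp only [List.mem_map, PySem.List.mem_pyRange_one]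
    constructor
    · rintro ⟨i, ⟨h0, hv⟩, rfl⟩; exact ⟨i, h0, hv, rfl⟩
    · rintro ⟨i, h0, hv, rfl⟩; exact ⟨i, ⟨h0, hv⟩, rfl⟩

-- packaging step used by all four direction cases of temp_move_spec
lemma temp_case (v : Int) (cells : List (Int × Int)) (seg : Int × Int × Int × Int)
    (nx ny : Int) (hnd : cells.Nodup) (hlen : cells.length = v.toNat)
    (hgood : 0 < v → goodP seg) (hmem : ∀ p, p ∈ cells ↔ inSegP p seg) :
    ((PySem.Set.ofList cells, nx, ny) : PySem.Set (Int × Int) × Int × Int).2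
        = ((seg, nx, ny) : (Int × Int × Int × Int) × Int × Int).2 ∧
    (PySem.Set.ofList cells : PySem.Set (Int × Int)).Nodup ∧
    (PySem.Set.ofList cells : PySem.Set (Int × Int)).length = v.toNat ∧
    (0 < v → goodP seg) ∧
    (∀ p, p ∈ (PySem.Set.ofList cells : PySem.Set (Int × Int)) ↔ inSegP p seg) := by
  have hx : PySem.Set.ofList cells = cells := PySem.Set.ofList_eq_self_of_nodup cells hnd
  rw [hx]
  exact ⟨rfl, hnd, hlen, hgood, hmem⟩

-- A's temp and B's segment describe the same cells; positions advance identically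
lemma temp_move_spec (walk : Nat) (x y v : Int) :
    (turtleTempA walk x y v).2 = (turtleMoveB walk x y v).2 ∧
    (turtleTempA walk x y v).1.Nodup ∧
    (turtleTempA walk x y v).1.length = v.toNat ∧
    (0 < v → goodP (turtleMoveB walk x y v).1) ∧
    (∀ p, p ∈ (turtleTempA walk x y v).1 ↔ inSegP p (turtleMoveB walk x y v).1) := by
  have h4 : walk % 4 = 0 ∨ walk % 4 = 1 ∨ walk % 4 = 2 ∨ walk % 4 = 3 := by omega
  rcases h4 with h | h | h | h
  · have eA : turtleTempA walk x y v
        = (PySem.Set.ofList ((PySem.List.pyRange 0 v 1).map (fun i => (x, y + (i + 1)))), x, y + v) := by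
      simp [turtleTempA, h]
    have eB : turtleMoveB walk x y v = ((x, y + 1, x, y + v), x, y + v) := by
      simp [turtleMoveB, h]
    rw [eA, eB]
    obtain ⟨hnd, hlen, hmem⟩ := cells_core (fun i => (x, y + (i + 1)))
      (by intro i j hij; simp only [Prod.mk.injEq] at hij; omega) v (x, y + 1, x, y + v)
      (by rintro ⟨px, py⟩
          dsimp only [inSegP]
          constructor
          · rintro ⟨h1, h2, h3, h4⟩
            exact ⟨py - y - 1, by omega, by omega, by rw [Prod.mk.injEq]; omega⟩
          · rintro ⟨i, h0, hv, hp⟩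
            rw [Prod.mk.injEq] at hp
            omega)
    exact temp_case v _ _ _ _ hnd hlen (by intro hv; dsimp only [goodP]; exact ⟨by omega, by omega⟩) hmem
  · have eA : turtleTempA walk x y v
        = (PySem.Set.ofList ((PySem.List.pyRange 0 v 1).map (fun i => (x + (i + 1), y))), x + v, y) := by
      simp [turtleTempA, h]
    have eB : turtleMoveB walk x y v = ((x + 1, y, x + v, y), x + v, y) := by
      simp [turtleMoveB, h]
    rw [eA, eB]
    obtain ⟨hnd, hlen, hmem⟩ := cells_core (fun i => (x + (i + 1), y))
      (by intro i j hij; simp only [Prod.mk.injEq] at hij; omega) v (x + 1, y, x + v, y)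
      (by rintro ⟨px, py⟩
          dsimp only [inSegP]
          constructor
          · rintro ⟨h1, h2, h3, h4⟩
            exact ⟨px - x - 1, by omega, by omega, by rw [Prod.mk.injEq]; omega⟩
          · rintro ⟨i, h0, hv, hp⟩
            rw [Prod.mk.injEq] at hp
            omega)
    exact temp_case v _ _ _ _ hnd hlen (by intro hv; dsimp only [goodP]; exact ⟨by omega, by omega⟩) hmem
  · have eA : turtleTempA walk x y v
        = (PySem.Set.ofList ((PySem.List.pyRange 0 v 1).map (fun i => (x, y - (i + 1)))), x, y - v) := by
      simp [turtleTempA, h]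
    have eB : turtleMoveB walk x y v = ((x, y - v, x, y - 1), x, y - v) := by
      simp [turtleMoveB, h]
    rw [eA, eB]
    obtain ⟨hnd, hlen, hmem⟩ := cells_core (fun i => (x, y - (i + 1)))
      (by intro i j hij; simp only [Prod.mk.injEq] at hij; omega) v (x, y - v, x, y - 1)
      (by rintro ⟨px, py⟩
          dsimp only [inSegP]
          constructor
          · rintro ⟨h1, h2, h3, h4⟩
            exact ⟨y - py - 1, by omega, by omega, by rw [Prod.mk.injEq]; omega⟩
          · rintro ⟨i, h0, hv, hp⟩
            rw [Prod.mk.injEq] at hp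
            omega)
    exact temp_case v _ _ _ _ hnd hlen (by intro hv; dsimp only [goodP]; exact ⟨by omega, by omega⟩) hmem
  · have eA : turtleTempA walk x y v
        = (PySem.Set.ofList ((PySem.List.pyRange 0 v 1).map (fun i => (x - (i + 1), y))), x - v, y) := by
      simp [turtleTempA, h]
    have eB : turtleMoveB walk x y v = ((x - v, y, x - 1, y), x - v, y) := by
      simp [turtleMoveB, h]
    rw [eA, eB]
    obtain ⟨hnd, hlen, hmem⟩ := cells_core (fun i => (x - (i + 1), y))
      (by intro i j hij; simp only [Prod.mk.injEq] at hij; omega) v (x - v, y, x - 1, y)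
      (by rintro ⟨px, py⟩
          dsimp only [inSegP]
          constructor
          · rintro ⟨h1, h2, h3, h4⟩
            exact ⟨x - px - 1, by omega, by omega, by rw [Prod.mk.injEq]; omega⟩
          · rintro ⟨i, h0, hv, hp⟩
            rw [Prod.mk.injEq] at hp
            omega)
    exact temp_case v _ _ _ _ hnd hlen (by intro hv; dsimp only [goodP]; exact ⟨by omega, by omega⟩) hmem

lemma go_eq (rest : List Int) : ∀ (walk : Nat) (aset : PySem.Set (Int × Int))
    (segs : List (Int × Int × Int × Int)) (x y : Int),
    aset.Nodup →
    (∀ p, p ∈ aset ↔ p = ((0 : Int), (0 : Int)) ∨ ∃ s ∈ segs, inSegP p s) →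
    (∀ s ∈ segs, goodP s) →
    turtleGoA rest walk aset x y (aset.length : Int) = turtleGoB rest walk segs x y := by
  induction rest with
  | nil => intro walk aset segs x y _ _ _; rfl
  | cons v rest ih =>
    intro walk aset segs x y hnd hmem hgood
    obtain ⟨hpos, htnd, htlen, hseg_good, htmem⟩ := temp_move_spec walk x y v
    set temp := (turtleTempA walk x y v).1 with htemp
    set seg := (turtleMoveB walk x y v).1 with hseg
    -- A's new set is aset followed by the genuinely new cells of this move
    have hunion : PySem.Set.union aset temp
        = aset ++ (PySem.Set.ofList temp).filter (fun p => !(PySem.Set.contains aset p)) :=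
      PySem.Set.update_eq_append_filter aset temp
    rw [PySem.Set.ofList_eq_self_of_nodup temp htnd] at hunion
    set fresh := temp.filter (fun p => !(PySem.Set.contains aset p)) with hfresh
    have hflen : fresh.length ≤ temp.length := List.length_filter_le _ _
    -- A triggers iff B triggers
    have hcond : ((aset.length : Int) + v ≠ ((PySem.Set.union aset temp).length : Int))
        ↔ (v < 0 || (v > 0 && segHits seg segs)) = true := by
      rw [hunion, List.length_append]
      rcases lt_trichotomy v 0 with hv | hv | hv
      · simp only [Bool.or_eq_true, decide_eq_true_eq]
        constructor
        · intro _; left; omega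
        · intro _; omega
      · subst hv
        have : temp.length = 0 := by rw [htlen]; rfl
        have hf0 : fresh.length = 0 := by omega
        simp [hf0]
      · -- v > 0
        have hiff : segHits seg segs = true ↔ ∃ p ∈ temp, p ∈ aset := by
          constructor
          · intro h
            rcases Bool.or_eq_true_iff.mp h with h | h
            · exact ⟨(0, 0), (htmem _).mpr ((segHitsOrigin_iff _).mp h),
                (hmem _).mpr (Or.inl rfl)⟩
            · obtain ⟨s, hsmem, hhit⟩ := List.any_eq_true.mp h
              obtain ⟨p, hp1, hp2⟩ :=
                (segHit_iff seg s (hseg_good hv) (hgood s hsmem)).mp hhit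
              exact ⟨p, (htmem _).mpr hp1, (hmem _).mpr (Or.inr ⟨s, hsmem, hp2⟩)⟩
          · rintro ⟨p, hpt, hpa⟩
            have hps := (htmem _).mp hpt
            rcases (hmem _).mp hpa with rfl | ⟨s, hsmem, hps'⟩
            · exact Bool.or_eq_true_iff.mpr (Or.inl ((segHitsOrigin_iff _).mpr hps))
            · exact Bool.or_eq_true_iff.mpr (Or.inr (List.any_eq_true.mpr
                ⟨s, hsmem, (segHit_iff seg s (hseg_good hv) (hgood s hsmem)).mpr ⟨p, hps, hps'⟩⟩))
        by_cases hh : segHits seg segs = true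
        · obtain ⟨p, hpt, hpa⟩ := hiff.mp hh
          have hlt : fresh.length < temp.length := by
            rw [hfresh, List.length_filter_lt_length_iff_exists]
            refine ⟨p, hpt, ?_⟩
            have hct : aset.contains p = true := (PySem.Set.contains_iff aset p).mpr hpa
            simp [hpa]
          constructor
          · intro _
            simp [hh, hv]
          · intro _
            omega
        · have hall : fresh = temp := by
            rw [hfresh]
            apply List.filter_eq_self.mpr
            intro p hp
            have hpna : p ∉ aset := fun hpa => hh (hiff.mpr ⟨p, hp, hpa⟩)
            cases hcp : aset.contains p with
            | false => simp
            | true => exact absurd ((PySem.Set.contains_iff aset p).mp hcp) hpna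
          rw [hall, htlen]
          constructor
          · intro hne
            exfalso
            omega
          · intro hr
            exfalso
            simp [hh] at hr
            omega
    simp only [turtleGoA, turtleGoB]
    by_cases hc : (v < 0 || (v > 0 && segHits (turtleMoveB walk x y v).1 segs)) = true
    · rw [if_pos hc, if_pos (hcond.mpr hc)]
    · rw [if_neg hc, if_neg (fun h => hc (hcond.mp h))]
      -- no crossing this move: recurse with the extended state
      have hlen' : (aset.length : Int) + v = ((PySem.Set.union aset temp).length : Int) :=
        not_not.mp (hcond.not.mpr hc)
      rw [hlen']
      have hx : (turtleTempA walk x y v).2.1 = (turtleMoveB walk x y v).2.1 := by rw [hpos]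
      have hy : (turtleTempA walk x y v).2.2 = (turtleMoveB walk x y v).2.2 := by rw [hpos]
      rw [hx, hy]
      apply ih
      · exact PySem.Set.nodup_union aset temp hnd
      · intro p
        rw [PySem.Set.mem_union]
        by_cases hv : 0 < v
        · rw [if_pos (by simpa using hv)]
          rw [hmem p, htmem p]
          constructor
          · rintro ((h | ⟨s, hs, hps⟩) | h)
            · exact Or.inl h
            · exact Or.inr ⟨s, List.mem_append_left _ hs, hps⟩
            · exact Or.inr ⟨seg, List.mem_append_right _ (by simp [hseg]), h⟩
          · rintro (h | ⟨s, hs, hps⟩)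
            · exact Or.inl (Or.inl h)
            · rcases List.mem_append.mp hs with hs | hs
              · exact Or.inl (Or.inr ⟨s, hs, hps⟩)
              · simp only [List.mem_singleton] at hs
                refine Or.inr ?_
                rw [hseg, ← hs]
                exact hps
        · rw [if_neg (by simpa using hv)]
          have hv0 : v = 0 ∨ v < 0 := by omega
          have hvz : v = 0 := by
            rcases hv0 with h | h
            · exact h
            · exact absurd (by simp [h] : (v < 0 || (v > 0 && segHits (turtleMoveB walk x y v).1 segs)) = true) hc
          have : temp.length = 0 := by rw [htlen, hvz]; rfl
          have ht0 : temp = [] := List.eq_nil_of_length_eq_zero this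
          have ht0' : (turtleTempA walk x y v).1 = [] := ht0
          rw [ht0']
          simp only [List.not_mem_nil, or_false]
          exact hmem p
      · intro s hs
        by_cases hv : 0 < v
        · rw [if_pos (by simpa using hv)] at hs
          rcases List.mem_append.mp hs with hs | hs
          · exact hgood s hs
          · simp only [List.mem_singleton] at hs
            exact hs ▸ hseg_good hv
        · rw [if_neg (by simpa using hv)] at hs
          exact hgood s hs

-- ===== VERDICT (by name: the statement is the Claim_ definition above) =====
theorem turtle_crossing_spec : Claim_equal_turtle_crossing := by
  intro A _
  unfold Spec_turtle_crossing turtle_crossing turtle_crossing_alt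
  have h := go_eq A 0 (PySem.Set.ofList [((0 : Int), (0 : Int))]) [] 0 0
    (by decide) (by intro p; simp [PySem.Set.ofList]) (by intro s hs; simp at hs)
  simpa using h
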